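-- pv_equiv track=rewrite | github.com/AgamSandhu-cysec/predator- | ui/ai_prompts.py | _extract_peas_sections
-- ===== SOURCE A (Python) =====
-- def _extract_peas_sections(peas_output: str, max_chars: int=5000) -> str:
--     """
--     Pull only the most relevant sections from LinPEAS output to save tokens.
--     Sections: SUID, Sudo, Cron, Capabilities, /etc/passwd, /etc/shadow, Kernel, NFS.
--     """
--     import re
--     key_headers = ['SUID', 'Sudo', 'NOPASSWD', 'Cron', 'Capabilities', 'passwd', 'shadow', 'Kernel', 'NFS', 'Writable', 'interesting', 'CVE', 'capabilities', 'docker', 'lxd']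
--     lines = peas_output.splitlines()
--     result_lines = []
--     capture = False
--     capture_count = 0
--     MAX_SECTION_LINES = 30
--     for line in lines:
--         if any((kw.lower() in line.lower() for kw in key_headers)):
--             capture = True
--             capture_count = 0
--         if capture:
--             result_lines.append(line)
--             capture_count += 1
--             if capture_count >= MAX_SECTION_LINES:
--                 capture = False
--     excerpt = '\n'.join(result_lines)
--     if len(excerpt) > max_chars:
--         excerpt = excerpt[:max_chars] + '\n...(truncated)'
--     return excerpt or peas_output[:max_chars]
-- ===== SOURCE B (Python) =====
-- def _extract_peas_sections(peas_output: str, max_chars: int=5000) -> str: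
--     """Two-pass: collect keyword line indices, mark their 30-line windows, emit marked lines."""
--     key_headers = ['SUID', 'Sudo', 'NOPASSWD', 'Cron', 'Capabilities', 'passwd', 'shadow', 'Kernel', 'NFS', 'Writable', 'interesting', 'CVE', 'capabilities', 'docker', 'lxd']
--     MAX_SECTION_LINES = 30
--     lines = peas_output.splitlines()
--     n = len(lines)
--     hits = [i for i in range(n) if any(kw.lower() in lines[i].lower() for kw in key_headers)]
--     captured = {i for k in hits for i in range(k, min(k + MAX_SECTION_LINES, n))}
--     result_lines = [lines[i] for i in range(n) if i in captured]
--     excerpt = '\n'.join(result_lines)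
--     if len(excerpt) > max_chars:
--         excerpt = excerpt[:max_chars] + '\n...(truncated)'
--     return excerpt or peas_output[:max_chars]
-- ===== Notes on version B (the rewrite author's own statement) =====
-- stated objective: alternative
-- what changed: Replaces A's single-pass capture-flag/counter state machine with a two-pass decomposition: first collect the keyword line indices, then mark the union of their 30-line forward windows as a set of captured indices, and finally emit the marked lines in order; the truncation/fallback tail is unchanged.
import Mathlib
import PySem

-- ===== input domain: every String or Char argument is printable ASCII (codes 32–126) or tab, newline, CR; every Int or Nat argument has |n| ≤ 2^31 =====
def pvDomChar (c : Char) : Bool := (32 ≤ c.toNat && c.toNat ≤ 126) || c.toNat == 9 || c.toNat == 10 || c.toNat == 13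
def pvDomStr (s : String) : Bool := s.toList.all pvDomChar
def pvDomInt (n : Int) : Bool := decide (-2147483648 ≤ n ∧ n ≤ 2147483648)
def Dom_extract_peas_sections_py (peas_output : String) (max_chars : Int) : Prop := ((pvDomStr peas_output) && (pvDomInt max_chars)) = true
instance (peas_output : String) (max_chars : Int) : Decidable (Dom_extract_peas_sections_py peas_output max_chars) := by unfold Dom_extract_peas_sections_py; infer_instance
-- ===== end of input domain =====

-- B replaces A's capture-flag/counter state machine by a two-pass decomposition (collect keyword
-- line indices, mark the union of their 30-line windows, emit marked lines); objective: alternative.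

-- ===== PORT A =====  (literal port of _extract_peas_sections over peas_output.toList)
def pvKeyHeaders : List String :=
  ["SUID", "Sudo", "NOPASSWD", "Cron", "Capabilities", "passwd", "shadow", "Kernel",
   "NFS", "Writable", "interesting", "CVE", "capabilities", "docker", "lxd"]

-- any(kw.lower() in line.lower() for kw in key_headers)
def pvHit (line : List Char) : Bool :=
  pvKeyHeaders.any (fun kw => PySem.Chars.isIn (PySem.Chars.lower kw.toList) (PySem.Chars.lower line))

-- one iteration of A's for-loop; state = (result_lines, capture, capture_count)
def pvStepA (s : List (List Char) × Bool × Int) (line : List Char) : List (List Char) × Bool × Int :=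
  let capture := if pvHit line then true else s.2.1
  let capture_count := if pvHit line then 0 else s.2.2
  if capture then
    let result_lines := s.1 ++ [line]
    let capture_count := capture_count + 1
    if capture_count ≥ 30 then (result_lines, false, capture_count)
    else (result_lines, true, capture_count)
  else (s.1, capture, capture_count)

def extract_peas_sections_py (peas_output : String) (max_chars : Int) : String :=
  let lines := PySem.Chars.splitlines peas_output.toList
  let st := lines.foldl pvStepA ([], false, 0)
  let excerpt := PySem.Chars.join ['\n'] st.1
  let excerpt :=
    if PySem.Chars.len excerpt > max_chars then
      PySem.Chars.slice excerpt none (some max_chars) ++ ("\n...(truncated)".toList)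
    else excerpt
  if excerpt ≠ [] then String.ofList excerpt
  else String.ofList (PySem.Chars.slice peas_output.toList none (some max_chars))

-- ===== PORT B =====  (literal port of Source B: hits, captured index set, emit)
def extract_peas_sections_py_alt (peas_output : String) (max_chars : Int) : String :=
  let lines := PySem.Chars.splitlines peas_output.toList
  let n := lines.length
  let hits := (List.range n).filter (fun i => pvHit (lines.getD i []))
  let captured : PySem.Set Nat :=
    PySem.Set.ofList (hits.flatMap (fun k => List.range' k (min (k + 30) n - k)))
  let result_lines := ((List.range n).filter (fun i => PySem.Set.contains captured i)).map
    (fun i => lines.getD i [])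
  let excerpt := PySem.Chars.join ['\n'] result_lines
  let excerpt :=
    if PySem.Chars.len excerpt > max_chars then
      PySem.Chars.slice excerpt none (some max_chars) ++ ("\n...(truncated)".toList)
    else excerpt
  if excerpt ≠ [] then String.ofList excerpt
  else String.ofList (PySem.Chars.slice peas_output.toList none (some max_chars))

-- ===== PRECONDITION & SPEC =====
def Spec_extract_peas_sections_py (peas_output : String) (max_chars : Int) (out : String) : Prop := out = extract_peas_sections_py_alt peas_output max_chars
instance (peas_output : String) (max_chars : Int) (out : String) : Decidable (Spec_extract_peas_sections_py peas_output max_chars out) := by unfold Spec_extract_peas_sections_py; infer_instance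

-- ===== CLAIM (what is proved, stated in full; the proofs are below) =====
def Claim_equal_extract_peas_sections_py : Prop := ∀ (peas_output : String) (max_chars : Int), Dom_extract_peas_sections_py peas_output max_chars → Spec_extract_peas_sections_py peas_output max_chars (extract_peas_sections_py peas_output max_chars)

-- ===== LEMMAS AND PROOFS =====

-- index i of `lines` is captured: some keyword line j ≤ i lies fewer than 30 lines above it
def pvCap (lines : List (List Char)) (i : Nat) : Bool :=
  (List.range (i + 1)).any (fun j => pvHit (lines.getD j []) && decide (i < j + 30))

-- last keyword index of `lines` (if any)
def pvLast (lines : List (List Char)) : Option Nat :=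
  ((List.range lines.length).filter (fun j => pvHit (lines.getD j []))).getLast?

-- the closed form of A's loop state after the whole fold
def pvSpecState (lines : List (List Char)) : List (List Char) × Bool × Int :=
  ( ((List.range lines.length).filter (fun i => pvCap lines i)).map (fun i => lines.getD i []),
    (match pvLast lines with
     | none => false
     | some j => decide (lines.length - j < 30)),
    (match pvLast lines with
     | none => (0 : Int)
     | some j => ((min (lines.length - j) 30 : Nat) : Int)) )

lemma pv_getLast?_le {l : List Nat} (h : l.Pairwise (· < ·)) {a : Nat} (ha : l.getLast? = some a) :
    ∀ b ∈ l, b ≤ a := by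
  induction l with
  | nil => simp at ha
  | cons x t ih =>
    intro b hb
    cases t with
    | nil =>
      simp only [List.getLast?_singleton, Option.some.injEq] at ha
      simp only [List.mem_singleton] at hb
      omega
    | cons y t' =>
      rw [List.getLast?_cons_cons] at ha
      rcases List.mem_cons.mp hb with rfl | hb'
      · have haMem : a ∈ y :: t' := List.mem_of_getLast? ha
        have := (List.pairwise_cons.mp h).1 a haMem
        omega
      · exact ih (List.pairwise_cons.mp h).2 ha b hb'

lemma pvLast_eq_some (lines : List (List Char)) {j : Nat} (h : pvLast lines = some j) :
    j < lines.length ∧ pvHit (lines.getD j []) = true ∧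
      ∀ j' < lines.length, pvHit (lines.getD j' []) = true → j' ≤ j := by
  unfold pvLast at h
  have hmem := List.mem_of_getLast? h
  have h1 := List.mem_filter.mp hmem
  refine ⟨List.mem_range.mp h1.1, h1.2, ?_⟩
  intro j' hj' hhit
  exact pv_getLast?_le (List.pairwise_lt_range.filter _) h j'
    (List.mem_filter.mpr ⟨List.mem_range.mpr hj', hhit⟩)

lemma pvLast_eq_none (lines : List (List Char)) (h : pvLast lines = none) :
    ∀ j < lines.length, pvHit (lines.getD j []) = false := by
  unfold pvLast at h
  rw [List.getLast?_eq_none_iff] at h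
  intro j hj
  by_contra hb
  have : j ∈ (List.range lines.length).filter (fun j => pvHit (lines.getD j [])) :=
    List.mem_filter.mpr ⟨List.mem_range.mpr hj, by simpa using hb⟩
  rw [h] at this
  exact absurd this (List.not_mem_nil)

lemma pvLast_append (lines : List (List Char)) (l : List Char) :
    pvLast (lines ++ [l]) = if pvHit l then some lines.length else pvLast lines := by
  unfold pvLast
  simp only [List.length_append, List.length_singleton]
  rw [List.range_succ, List.filter_append,
    List.filter_congr (fun j hj => by
      rw [List.getD_append _ _ _ _ (List.mem_range.mp hj)] : ∀ j ∈ List.range lines.length, _)]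
  by_cases hl : pvHit l
  · simp [List.filter, hl]
  · simp [List.filter, hl]

lemma pvCap_append_lt (lines : List (List Char)) (l : List Char) {i : Nat} (hi : i < lines.length) :
    pvCap (lines ++ [l]) i = pvCap lines i := by
  unfold pvCap
  apply PySem.List.any_congr_mem
  intro j hj
  have := List.mem_range.mp hj
  rw [List.getD_append _ _ _ _ (by omega)]

lemma pv_any_window (lines : List (List Char)) (m : Nat) :
    (List.range lines.length).any (fun j => pvHit (lines.getD j []) && decide (m < j + 30)) =
      (match pvLast lines with
       | none => false
       | some j => decide (m < j + 30)) := by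
  cases hp : pvLast lines with
  | none =>
    have : (List.range lines.length).any (fun j => pvHit (lines.getD j []) && decide (m < j + 30)) = false := by
      rw [List.any_eq_false]
      intro x hx
      have hfx := pvLast_eq_none lines hp x (List.mem_range.mp hx)
      simp only [List.getD_eq_getElem?_getD] at hfx ⊢
      simp [hfx]
    rw [this]
  | some j =>
    obtain ⟨hjn, hhit, hmax⟩ := pvLast_eq_some lines hp
    by_cases hw : m < j + 30
    · have : (List.range lines.length).any (fun j => pvHit (lines.getD j []) && decide (m < j + 30)) = true :=
        List.any_eq_true.mpr ⟨j, List.mem_range.mpr hjn, by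
          simp only [List.getD_eq_getElem?_getD] at hhit ⊢
          simp [hhit, hw]⟩
      rw [this]; simp [hw]
    · have : (List.range lines.length).any (fun j => pvHit (lines.getD j []) && decide (m < j + 30)) = false := by
        rw [List.any_eq_false]
        intro x hx
        simp only [Bool.and_eq_true, decide_eq_true_eq, not_and]
        intro hhx
        have := hmax x (List.mem_range.mp hx) hhx
        omega
      rw [this]; simp [hw]

lemma pvCap_append_last (lines : List (List Char)) (l : List Char) :
    pvCap (lines ++ [l]) lines.length =
      (pvHit l || (match pvLast lines with
                   | none => false
                   | some j => decide (lines.length - j < 30))) := by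
  unfold pvCap
  rw [List.range_succ, List.any_append,
    PySem.List.any_congr_mem (fun j hj => by
      rw [List.getD_append _ _ _ _ (List.mem_range.mp hj)] :
      ∀ j ∈ List.range lines.length, _)]
  have h2 : ([lines.length].any (fun j => pvHit ((lines ++ [l]).getD j []) && decide (lines.length < j + 30))) = pvHit l := by
    simp
  rw [h2, pv_any_window, Bool.or_comm]
  congr 1
  cases hp : pvLast lines with
  | none => rfl
  | some j =>
    obtain ⟨hjn, _, _⟩ := pvLast_eq_some lines hp
    simp only [decide_eq_decide]
    omega

lemma pv_foldA_eq (lines : List (List Char)) :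
    lines.foldl pvStepA ([], false, 0) = pvSpecState lines := by
  induction lines using List.reverseRecOn with
  | nil => rfl
  | append_singleton lines l ih =>
    rw [List.foldl_append, ih, List.foldl_cons, List.foldl_nil]
    have hacc : ((List.range (lines ++ [l]).length).filter (fun i => pvCap (lines ++ [l]) i)).map
        (fun i => (lines ++ [l]).getD i []) =
        (((List.range lines.length).filter (fun i => pvCap lines i)).map (fun i => lines.getD i []))
        ++ (if pvCap (lines ++ [l]) lines.length then [l] else []) := by
      simp only [List.length_append, List.length_singleton]
      rw [List.range_succ, List.filter_append, List.map_append]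
      congr 1
      · rw [List.filter_congr (fun j hj => pvCap_append_lt lines l (List.mem_range.mp hj))]
        apply List.map_congr_left
        intro j hj
        have := List.mem_range.mp (List.mem_filter.mp hj).1
        rw [List.getD_append _ _ _ _ this]
      · by_cases hc : pvCap (lines ++ [l]) lines.length <;>
          simp [List.filter, hc]
    unfold pvSpecState
    rw [hacc, pvLast_append, pvCap_append_last]
    simp only [List.length_append, List.length_singleton]
    unfold pvStepA
    by_cases hl : pvHit l
    · simp only [hl, if_true, Bool.true_or]
      have e1 : lines.length + 1 - lines.length = 1 := by omega
      rw [e1, if_neg (by omega)]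
      norm_num
    · simp only [hl, Bool.false_eq_true, if_false, Bool.false_or]
      cases hp : pvLast lines with
      | none => simp
      | some j =>
        obtain ⟨hjn, hhit, hmax⟩ := pvLast_eq_some lines hp
        by_cases hw : lines.length - j < 30
        · simp only [hw, decide_true, if_true]
          have e2 : min (lines.length - j) 30 = lines.length - j := by omega
          rw [e2]
          by_cases hend : ((lines.length - j : Nat) : Int) + 1 ≥ 30
          · rw [if_pos hend]
            simp only [Prod.mk.injEq]
            refine ⟨trivial, ?_, ?_⟩
            · have h3 : ¬(lines.length + 1 - j < 30) := by omega
              simp [h3]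
            · omega
          · rw [if_neg hend]
            simp only [Prod.mk.injEq]
            refine ⟨trivial, ?_, ?_⟩
            · have h3 : lines.length + 1 - j < 30 := by omega
              simp [h3]
            · omega
        · simp only [hw, decide_false, Bool.false_eq_true, if_false]
          simp only [Prod.mk.injEq]
          refine ⟨by simp, ?_, ?_⟩
          · have h3 : ¬(lines.length + 1 - j < 30) := by omega
            simp [h3]
          · omega

lemma pv_capturedSet (lines : List (List Char)) (i : Nat) (hi : i < lines.length) :
    PySem.Set.contains
      (PySem.Set.ofList
        (((List.range lines.length).filter (fun j => pvHit (lines.getD j []))).flatMap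
          (fun k => List.range' k (min (k + 30) lines.length - k)))) i = pvCap lines i := by
  rw [Bool.eq_iff_iff, PySem.Set.contains_iff]
  unfold pvCap
  rw [PySem.Set.mem_ofList, List.any_eq_true, List.mem_flatMap]
  constructor
  · rintro ⟨k, hk, hik⟩
    obtain ⟨hkr, hkhit⟩ := List.mem_filter.mp hk
    have hkn := List.mem_range.mp hkr
    have hmem := List.mem_range'_1.mp hik
    refine ⟨k, List.mem_range.mpr (by omega), ?_⟩
    simp only [Bool.and_eq_true, decide_eq_true_eq]
    exact ⟨hkhit, by omega⟩
  · rintro ⟨j, hjr, hj⟩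
    simp only [Bool.and_eq_true, decide_eq_true_eq] at hj
    have hji := List.mem_range.mp hjr
    exact ⟨j, List.mem_filter.mpr ⟨List.mem_range.mpr (by omega), hj.1⟩,
      List.mem_range'_1.mpr (by omega)⟩

lemma pv_result_lines_eq (lines : List (List Char)) :
    (lines.foldl pvStepA ([], false, 0)).1 =
      ((List.range lines.length).filter (fun i =>
        PySem.Set.contains
          (PySem.Set.ofList
            (((List.range lines.length).filter (fun j => pvHit (lines.getD j []))).flatMap
              (fun k => List.range' k (min (k + 30) lines.length - k)))) i)).map
        (fun i => lines.getD i []) := by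
  rw [pv_foldA_eq]
  refine congrArg _ (List.filter_congr ?_)
  intro i hi
  exact (pv_capturedSet lines i (List.mem_range.mp hi)).symm

-- ===== VERDICT (by name: the statement is the Claim_ definition above) =====
theorem extract_peas_sections_py_spec : Claim_equal_extract_peas_sections_py := by
  intro peas_output max_chars _
  unfold Spec_extract_peas_sections_py extract_peas_sections_py extract_peas_sections_py_alt
  simp only [pv_result_lines_eq]
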